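-- pv_equiv track=rewrite | github.com/bosticry90/ToE | formal/python/tests/test_lean_conditionality_labeling.py | extract_decl_header
-- ===== SOURCE A (Python) =====
-- def extract_decl_header(text: str, start_idx: int) -> str:
--     """
--     Extract a conservative header chunk starting at the theorem/lemma line,
--     stopping at ':=' or 'where' or 'by' that typically ends the statement header.
--     """
--     tail = text[start_idx : start_idx + 4000]  # bounded
--     stop_tokens = [":=", "\nwhere", "\nby"]
--     stop = len(tail)
--     for tok in stop_tokens:
--         j = tail.find(tok)
--         if j != -1:
--             stop = min(stop, j)
--     return tail[:stop]
-- ===== SOURCE B (Python) =====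
-- def extract_decl_header(text: str, start_idx: int) -> str:
--     """Single left-to-right scan: return tail[:i] at the first index i where
--     any stop token starts; else the whole tail."""
--     tail = text[start_idx : start_idx + 4000]
--     tokens = (":=", "\nwhere", "\nby")
--     for i in range(len(tail)):
--         if any(tail.startswith(tok, i) for tok in tokens):
--             return tail[:i]
--     return tail
-- ===== Notes on version B (the rewrite author's own statement) =====
-- stated objective: alternative
-- what changed: Replaced the three independent str.find scans plus min-accumulation with a single left-to-right scan that returns at the first index where any stop token starts.
import Mathlib
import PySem

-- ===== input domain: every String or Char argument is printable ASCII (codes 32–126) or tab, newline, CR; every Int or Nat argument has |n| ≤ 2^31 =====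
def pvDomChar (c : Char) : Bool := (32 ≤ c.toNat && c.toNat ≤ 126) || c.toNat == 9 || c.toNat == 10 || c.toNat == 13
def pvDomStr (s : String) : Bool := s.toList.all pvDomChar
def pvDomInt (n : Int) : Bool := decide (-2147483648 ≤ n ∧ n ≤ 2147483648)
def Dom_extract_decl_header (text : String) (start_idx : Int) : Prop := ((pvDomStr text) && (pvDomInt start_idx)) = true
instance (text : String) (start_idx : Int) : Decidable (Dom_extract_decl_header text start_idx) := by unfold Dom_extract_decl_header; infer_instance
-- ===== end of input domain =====

-- B replaces A's three independent find scans + min-accumulation with a single left-to-right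
-- scan stopping at the first index where any stop token starts (alternative decomposition, same cost).


-- the stop-token list both Pythons carry as a literal
def pvToks : List (List Char) := [":=".toList, "\nwhere".toList, "\nby".toList]

-- ===== PORT A =====
-- loop body of A: j = tail.find(tok); if j != -1: stop = min(stop, j)
def pvStep (tail : List Char) (stop : Int) (tok : List Char) : Int :=
  if PySem.Chars.find tail tok ≠ -1 then min stop (PySem.Chars.find tail tok) else stop

-- tail = text[start_idx:start_idx+4000]; stop = len(tail); for tok in stop_tokens: <pvStep>; return tail[:stop]
def extract_decl_header (text : String) (start_idx : Int) : String :=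
  let tail := PySem.List.slice text.toList (some start_idx) (some (start_idx + 4000))
  let stop := pvToks.foldl (pvStep tail) ((tail.length : Int))
  String.ofList (PySem.List.slice tail none (some stop))

-- ===== PORT B =====
-- for i in range(len(tail)): if any(tail.startswith(tok, i) for tok in tokens): return tail[:i]; return tail
-- tail.startswith(tok, i) with 0 ≤ i ≤ len(tail) is exactly startswith (tail.drop i) tok
def pvScan (tail : List Char) (i : Nat) : Nat :=
  if i < tail.length then
    if pvToks.any (fun tok => PySem.Chars.startswith (tail.drop i) tok) then i
    else pvScan tail (i + 1)
  else tail.length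
termination_by tail.length - i

def extract_decl_header_alt (text : String) (start_idx : Int) : String :=
  let tail := PySem.List.slice text.toList (some start_idx) (some (start_idx + 4000))
  String.ofList (tail.take (pvScan tail 0))

-- ===== PRECONDITION & SPEC =====
def Spec_extract_decl_header (text : String) (start_idx : Int) (out : String) : Prop := out = extract_decl_header_alt text start_idx
instance (text : String) (start_idx : Int) (out : String) : Decidable (Spec_extract_decl_header text start_idx out) := by unfold Spec_extract_decl_header; infer_instance

-- ===== CLAIM (what is proved, stated in full; the proofs are below) =====
def Claim_equal_extract_decl_header : Prop := ∀ (text : String) (start_idx : Int), Dom_extract_decl_header text start_idx → Spec_extract_decl_header text start_idx (extract_decl_header text start_idx)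

-- ===== LEMMAS AND PROOFS =====

-- "some stop token starts at index j of tail"
def pvHit (tail : List Char) (j : Nat) : Prop := ∃ t ∈ pvToks, t <+: tail.drop j

lemma pvHit_iff_any (tail : List Char) (j : Nat) :
    pvHit tail j ↔ pvToks.any (fun tok => PySem.Chars.startswith (tail.drop j) tok) = true := by
  simp [pvHit, List.any_eq_true, PySem.Chars.startswith_iff]

-- pvScan spec: bounds, minimality, and a hit at the result when it is < length
lemma pvScan_spec (tail : List Char) : ∀ i, pvScan tail i ≤ tail.length ∧
    (∀ j, i ≤ j → j < pvScan tail i → ¬ pvHit tail j) ∧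
    (pvScan tail i < tail.length → pvHit tail (pvScan tail i)) := by
  intro i
  induction' h : tail.length - i using Nat.strong_induction_on with n ih generalizing i
  rw [pvScan]
  by_cases hi : i < tail.length
  · rw [if_pos hi]
    by_cases hhit : pvToks.any (fun tok => PySem.Chars.startswith (tail.drop i) tok) = true
    · rw [if_pos hhit]
      exact ⟨le_of_lt hi, fun j h1 h2 => absurd h1 (by omega),
        fun _ => (pvHit_iff_any tail i).mpr hhit⟩
    · rw [if_neg hhit]
      obtain ⟨h2, h3, h4⟩ := ih (tail.length - (i + 1)) (by omega) (i + 1) rfl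
      refine ⟨h2, ?_, h4⟩
      intro j hj1 hj2
      rcases Nat.lt_or_ge j (i + 1) with hlt | hge
      · have hj : j = i := by omega
        subst hj
        exact fun hc => hhit ((pvHit_iff_any tail j).mp hc)
      · exact h3 j hge hj2
  · rw [if_neg hi]
    exact ⟨le_refl _, fun j h1 h2 => absurd h2 (by omega), fun h => absurd h (lt_irrefl _)⟩

lemma pvFold_le (tail : List Char) (l : List (List Char)) : ∀ s : Int, l.foldl (pvStep tail) s ≤ s := by
  induction l with
  | nil => intro s; simp
  | cons t l ih =>
    intro s
    calc (t :: l).foldl (pvStep tail) s = l.foldl (pvStep tail) (pvStep tail s t) := rfl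
      _ ≤ pvStep tail s t := ih _
      _ ≤ s := by unfold pvStep; split_ifs <;> simp

lemma pvFold_le_find (tail : List Char) (l : List (List Char)) :
    ∀ s : Int, ∀ t ∈ l, PySem.Chars.find tail t ≠ -1 →
      l.foldl (pvStep tail) s ≤ PySem.Chars.find tail t := by
  induction l with
  | nil => intro s t ht; simp at ht
  | cons u l ih =>
    intro s t ht hf
    rcases List.mem_cons.mp ht with rfl | hmem
    · calc (t :: l).foldl (pvStep tail) s = l.foldl (pvStep tail) (pvStep tail s t) := rfl
        _ ≤ pvStep tail s t := pvFold_le tail l _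
        _ ≤ PySem.Chars.find tail t := by unfold pvStep; rw [if_pos hf]; exact min_le_right _ _
    · exact ih _ t hmem hf

lemma pvFold_cases (tail : List Char) (l : List (List Char)) :
    ∀ s : Int, l.foldl (pvStep tail) s = s ∨
      ∃ t ∈ l, PySem.Chars.find tail t ≠ -1 ∧ l.foldl (pvStep tail) s = PySem.Chars.find tail t := by
  induction l with
  | nil => intro s; left; rfl
  | cons u l ih =>
    intro s
    have hstep : (u :: l).foldl (pvStep tail) s = l.foldl (pvStep tail) (pvStep tail s u) := rfl
    rcases ih (pvStep tail s u) with h | ⟨t, hmem, hf, he⟩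
    · rw [hstep, h]
      unfold pvStep
      by_cases hu : PySem.Chars.find tail u ≠ -1
      · rw [if_pos hu]
        rcases min_cases s (PySem.Chars.find tail u) with ⟨he, _⟩ | ⟨he, _⟩
        · left; exact he
        · right; exact ⟨u, List.mem_cons_self .., hu, he⟩
      · rw [if_neg hu]; left; rfl
    · right; exact ⟨t, List.mem_cons_of_mem _ hmem, hf, by rw [hstep, he]⟩

-- hit at j gives a token whose find is defined and ≤ j
lemma pvHit_find_le (tail : List Char) (j : Nat) (h : pvHit tail j) :
    ∃ t ∈ pvToks, PySem.Chars.find tail t ≠ -1 ∧ PySem.Chars.find tail t ≤ (j : Int) := by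
  obtain ⟨t, hmem, hpre⟩ := h
  have hinf : t <:+: tail := hpre.isInfix.trans (List.drop_suffix j tail).isInfix
  have hne : PySem.Chars.find tail t ≠ -1 := (PySem.Chars.find_ne_neg_one_iff tail t).mpr hinf
  have hnn : 0 ≤ PySem.Chars.find tail t := (PySem.Chars.find_nonneg_iff tail t).mpr hinf
  obtain ⟨_, hmin⟩ := PySem.Chars.find_spec hnn
  refine ⟨t, hmem, hne, ?_⟩
  by_contra hc
  push Not at hc
  exact hmin j (by omega) hpre

lemma pvStop_nonneg (tail : List Char) : 0 ≤ pvToks.foldl (pvStep tail) (tail.length : Int) := by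
  rcases pvFold_cases tail pvToks (tail.length : Int) with h | ⟨t, _, hf, he⟩
  · rw [h]; positivity
  · rw [he]
    have := PySem.Chars.neg_one_le_find tail t
    omega

-- the central equality: A's stop (cast to Nat) equals B's scan result
lemma pvStop_eq_scan (tail : List Char) :
    (pvToks.foldl (pvStep tail) (tail.length : Int)).toNat = pvScan tail 0 := by
  set S := pvToks.foldl (pvStep tail) (tail.length : Int) with hS
  set N := pvScan tail 0 with hN
  obtain ⟨hNlen, hNmin, hNhit⟩ := pvScan_spec tail 0
  rw [← hN] at hNlen hNmin hNhit
  have hSle : S ≤ (tail.length : Int) := pvFold_le tail pvToks _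
  have hSnn : 0 ≤ S := pvStop_nonneg tail
  have hle1 : N ≤ S.toNat := by
    by_contra hc
    push Not at hc
    have hSlt : S.toNat < tail.length := by omega
    have hhit : pvHit tail S.toNat := by
      rcases pvFold_cases tail pvToks (tail.length : Int) with h | ⟨t, hmem, hf, he⟩
      · rw [hS, h] at hSlt; omega
      · have hnn : 0 ≤ PySem.Chars.find tail t := by rw [hS, he] at hSnn; exact hSnn
        obtain ⟨hpre, _⟩ := PySem.Chars.find_spec hnn
        refine ⟨t, hmem, ?_⟩
        rw [hS, he]
        exact hpre
    exact hNmin S.toNat (Nat.zero_le _) hc hhit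
  have hle2 : S.toNat ≤ N := by
    by_contra hc
    push Not at hc
    have hNlt : N < tail.length := by omega
    obtain ⟨t, hmem, hf, hfle⟩ := pvHit_find_le tail N (hNhit hNlt)
    have := pvFold_le_find tail pvToks (tail.length : Int) t hmem hf
    rw [← hS] at this
    omega
  omega

-- ===== VERDICT (by name: the statement is the Claim_ definition above) =====
theorem extract_decl_header_spec : Claim_equal_extract_decl_header := by
  intro text start_idx _
  unfold Spec_extract_decl_header extract_decl_header extract_decl_header_alt
  set tail := PySem.List.slice text.toList (some start_idx) (some (start_idx + 4000)) with htail
  show String.ofList (PySem.List.slice tail none (some (pvToks.foldl (pvStep tail) ((tail.length : Int))))) = String.ofList (tail.take (pvScan tail 0))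
  rw [PySem.List.slice_to tail (pvStop_nonneg tail), pvStop_eq_scan tail]
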